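-- pv_equiv track=rewrite | github.com/laohur/UnicodeTokenizer | UnicodeTokenizer.py | split_marks
-- ===== SOURCE A (Python) =====
-- def split_marks(line,marks):
--     tokens = []
--     for i, x in enumerate(line):
--         if i == 0:
--             tokens.append(x)
--             continue
--         if marks[i] or marks[i-1]:
--             tokens.append(x)
--             continue
--         else:
--             tokens[-1] += x
--     return tokens
-- ===== SOURCE B (Python) =====
-- def split_marks(line, marks):
--     n = len(line)
--     starts = [i for i in range(n) if i == 0 or marks[i] or marks[i - 1]]
--     ends = starts[1:] + [n]
--     return [line[s:e] for s, e in zip(starts, ends)]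
-- ===== Notes on version B (the rewrite author's own statement) =====
-- stated objective: alternative
-- what changed: B first builds the table of token start indices (0 and every i with marks[i] or marks[i-1]) and then slices the line between consecutive starts, instead of A's per-character loop that appends or extends the last token.
import Mathlib
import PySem

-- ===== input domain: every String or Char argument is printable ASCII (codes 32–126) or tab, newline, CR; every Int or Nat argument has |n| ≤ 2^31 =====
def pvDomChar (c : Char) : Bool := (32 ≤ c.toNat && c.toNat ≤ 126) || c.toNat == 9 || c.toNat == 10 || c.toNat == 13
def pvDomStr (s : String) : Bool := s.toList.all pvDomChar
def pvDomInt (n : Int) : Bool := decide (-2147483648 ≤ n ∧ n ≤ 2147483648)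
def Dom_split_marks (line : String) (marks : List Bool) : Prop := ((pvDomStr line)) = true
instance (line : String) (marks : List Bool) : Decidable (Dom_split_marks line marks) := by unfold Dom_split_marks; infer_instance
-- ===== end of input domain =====

-- B replaces A's per-character append/extend loop by a boundary-index table followed by a slicing pass (objective: alternative decomposition, same O(n) cost).

-- ===== PORT A =====
-- loop body of A's 'for i, x in enumerate(line)'; marks[i] / marks[i-1] are ported with
-- pyGetD, exact under Pre_split_marks (outside it Python raises IndexError)
def stepA (marks : List Bool) (tokens : List String) (p : Int × Char) : List String :=
  if p.1 == 0 then tokens ++ [String.ofList [p.2]]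
  else if PySem.List.pyGetD marks p.1 false || PySem.List.pyGetD marks (p.1 - 1) false then
    tokens ++ [String.ofList [p.2]]
  else tokens.dropLast ++ [tokens.getLast! ++ String.ofList [p.2]]

def split_marks (line : String) (marks : List Bool) : List String :=
  (PySem.List.enumerate line.toList 0).foldl (stepA marks) []

-- ===== PORT B =====
def split_marks_alt (line : String) (marks : List Bool) : List String :=
  let n := line.toList.length
  let starts := (PySem.List.pyRange 0 (n : Int) 1).filter
      (fun i => i == 0 || PySem.List.pyGetD marks i false || PySem.List.pyGetD marks (i - 1) false)
  let ends := starts.drop 1 ++ [(n : Int)]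
  (starts.zip ends).map (fun p => String.ofList (PySem.List.slice line.toList (some p.1) (some p.2)))

-- ===== PRECONDITION & SPEC =====
-- Pre_ excludes exactly the inputs where Python A raises IndexError (marks shorter than a
-- line of length ≥ 2); Python B raises there too.
def Pre_split_marks (line : String) (marks : List Bool) : Prop :=
  line.toList.length ≤ 1 ∨ line.toList.length ≤ marks.length
instance (line : String) (marks : List Bool) : Decidable (Pre_split_marks line marks) := by
  unfold Pre_split_marks; infer_instance
def pvWitness_split_marks : String × List Bool := ("ab", [false, true])

def Spec_split_marks (line : String) (marks : List Bool) (out : List String) : Prop := out = split_marks_alt line marks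
instance (line : String) (marks : List Bool) (out : List String) : Decidable (Spec_split_marks line marks out) := by unfold Spec_split_marks; infer_instance

-- ===== CLAIM (what is proved, stated in full; the proofs are below) =====
def Claim_equal_split_marks : Prop := ∀ (line : String) (marks : List Bool), Dom_split_marks line marks → Pre_split_marks line marks → Spec_split_marks line marks (split_marks line marks)

-- ===== LEMMAS AND PROOFS =====

-- Nat-level boundary predicate / start table / segment table shared by both proof directions
def predN (marks : List Bool) (i : Nat) : Bool :=
  i == 0 || marks.getD i false || marks.getD (i - 1) false

def startsN (marks : List Bool) (m : Nat) : List Nat := (List.range m).filter (predN marks)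

def segOf (cs : List Char) (p : Nat × Nat) : String :=
  String.ofList ((cs.drop p.1).take (p.2 - p.1))

def segsN (cs : List Char) (marks : List Bool) (m : Nat) : List String :=
  ((startsN marks m).zip ((startsN marks m).drop 1 ++ [m])).map (segOf cs)

theorem mem_startsN_lt {marks : List Bool} {m s : Nat} (h : s ∈ startsN marks m) : s < m := by
  have := List.mem_filter.mp h
  exact List.mem_range.mp this.1

theorem startsN_succ (marks : List Bool) (m : Nat) :
    startsN marks (m + 1) = startsN marks m ++ if predN marks m then [m] else [] := by
  unfold startsN
  rw [List.range_succ, List.filter_append]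
  cases h : predN marks m <;> simp [List.filter, h]

theorem zero_mem_startsN (marks : List Bool) {m : Nat} (h : 0 < m) : 0 ∈ startsN marks m := by
  refine List.mem_filter.mpr ⟨List.mem_range.mpr h, ?_⟩
  simp [predN]

theorem startsN_ne_nil (marks : List Bool) {m : Nat} (h : 0 < m) : startsN marks m ≠ [] :=
  List.ne_nil_of_mem (zero_mem_startsN marks h)

-- slicing is stable under extending the char list, as long as the end stays in range
theorem seg_stable (ds : List Char) (x : Char) {s e : Nat} (he : e ≤ ds.length) :
    segOf (ds ++ [x]) (s, e) = segOf ds (s, e) := by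
  unfold segOf
  by_cases hse : e ≤ s
  · simp [Nat.sub_eq_zero_of_le hse]
  · have hs : s ≤ ds.length := le_trans (le_of_not_ge hse) he
    rw [List.drop_append_of_le_length hs, List.take_append_of_le_length]
    simpa [List.length_drop] using Nat.sub_le_sub_right he s

theorem predInt_comp (marks : List Bool) :
    ((fun i : Int => i == 0 || PySem.List.pyGetD marks i false
        || PySem.List.pyGetD marks (i - 1) false) ∘ (fun k : Nat => (k : Int))) = predN marks := by
  funext i
  cases i with
  | zero => simp [predN]
  | succ k =>
    simp only [Function.comp_apply]
    rw [show ((((k + 1 : Nat) : Int)) - 1) = ((k : Int)) by push_cast; ring]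
    simp only [PySem.List.pyGetD_natCast]
    have hx : (((k : Int) + 1) == 0) = false := beq_eq_false_iff_ne.mpr (by omega)
    simp [predN, hx]

theorem B_eq_segsN (line : String) (marks : List Bool) :
    split_marks_alt line marks = segsN line.toList marks line.toList.length := by
  simp only [split_marks_alt, segsN]
  rw [PySem.List.pyRange_zero_natCast, List.filter_map, predInt_comp]
  have hs : List.filter (predN marks) (List.range line.toList.length)
      = startsN marks line.toList.length := rfl
  rw [hs, ← List.map_drop]
  have h2 : ((startsN marks line.toList.length).drop 1).map (fun k : Nat => (k : Int)) ++ [(line.toList.length : Int)]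
      = (((startsN marks line.toList.length).drop 1) ++ [line.toList.length]).map (fun k : Nat => (k : Int)) := by
    simp
  rw [h2, List.zip_map, List.map_map]
  refine List.map_congr_left ?_
  intro p _
  cases p with
  | mk a b =>
    simp [segOf, Prod.map, PySem.List.slice_natCast]

theorem getLast!_concat_str (l : List String) (a : String) : (l ++ [a]).getLast! = a := by
  cases l with
  | nil => rfl
  | cons y ys => simp [List.getLast!]

theorem map_seg_stable (ds : List Char) (x : Char) (L : List (Nat × Nat))
    (h : ∀ p ∈ L, p.2 ≤ ds.length) :
    L.map (segOf (ds ++ [x])) = L.map (segOf ds) :=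
  List.map_congr_left fun p hp => by
    obtain ⟨a, b⟩ := p
    exact seg_stable ds x (h _ hp)

theorem step_segs (ds : List Char) (x : Char) (marks : List Bool) :
    stepA marks (segsN ds marks ds.length) ((ds.length : Int), x)
      = segsN (ds ++ [x]) marks (ds.length + 1) := by
  rcases Nat.eq_zero_or_pos ds.length with hm | hm
  · -- empty prefix: first character always opens a token
    obtain rfl : ds = [] := List.length_eq_zero_iff.mp hm
    simp [stepA, segsN, startsN, predN, segOf, List.range_succ]
  · generalize hmd : ds.length = m at hm ⊢
    have hS : startsN marks m ≠ [] := startsN_ne_nil marks hm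
    set S := startsN marks m with hSdef
    have hlt : ∀ b ∈ S, b < m := fun b hb => mem_startsN_lt hb
    have hc0 : (((m : Nat) : Int) == 0) = false := beq_eq_false_iff_ne.mpr (by omega)
    have hcast : (((m : Nat) : Int) - 1) = (((m - 1 : Nat)) : Int) := by
      rw [Nat.cast_sub hm]; simp
    have hcond : (PySem.List.pyGetD marks ((m : Nat) : Int) false
        || PySem.List.pyGetD marks (((m : Nat) : Int) - 1) false) = predN marks m := by
      rw [hcast]
      simp only [PySem.List.pyGetD_natCast, predN]
      have : (m == 0) = false := beq_eq_false_iff_ne.mpr (by omega)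
      simp [this]
    have hSpos : 0 < S.length := List.length_pos_of_ne_nil hS
    have hdrop1 : (S ++ [m]).drop 1 = S.drop 1 ++ [m] :=
      List.drop_append_of_le_length (by omega)
    have hlen1 : S.length = (S.drop 1 ++ [m]).length := by
      simp
      omega
    unfold stepA
    rw [hc0]
    simp only [Bool.false_eq_true, if_false, hcond]
    conv_rhs => rw [segsN, startsN_succ marks m]
    rw [← hSdef]
    cases hp : predN marks m with
    | true =>
      -- boundary at m: a new one-character token is appended
      simp only [if_true, hdrop1]
      rw [List.zip_append hlen1]
      rw [List.map_append]
      have hstab : (S.zip (S.drop 1 ++ [m])).map (segOf (ds ++ [x]))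
          = (S.zip (S.drop 1 ++ [m])).map (segOf ds) := by
        refine map_seg_stable ds x _ ?_
        intro p hp2
        have hb := (List.of_mem_zip hp2).2
        rcases List.mem_append.mp hb with h' | h'
        · have := hlt _ (List.mem_of_mem_drop h'); omega
        · simp at h'; omega
      have hlast : segOf (ds ++ [x]) (m, m + 1) = String.ofList [x] := by
        unfold segOf
        rw [show (m : Nat) = ds.length from hmd.symm, List.drop_append_of_le_length (le_refl _)]
        simp
      simp only [List.zip_cons_cons, List.zip_nil_right]  -- normalize [m].zip [m+1]
      rw [hstab]
      unfold segsN
      rw [← hSdef]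
      congr 1
      simp [List.map_cons, hlast]
    | false =>
      -- no boundary: x is glued onto the last token
      simp only [Bool.false_eq_true, if_false, List.append_nil]
      set I := S.dropLast with hIdef
      have hSsplit : I ++ [S.getLast hS] = S := List.dropLast_concat_getLast hS
      set sl := S.getLast hS with hsldef
      have hsl_lt : sl < m := hlt _ (List.getLast_mem hS)
      have hlenI : I.length = (S.drop 1).length := by
        simp [hIdef, List.length_dropLast]
      have hzip : ∀ e : Nat, S.zip (S.drop 1 ++ [e]) = I.zip (S.drop 1) ++ [(sl, e)] := by
        intro e
        have h' : (I ++ [sl]).zip (S.drop 1 ++ [e]) = I.zip (S.drop 1) ++ [(sl, e)] := by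
          rw [List.zip_append hlenI]
          rfl
        rw [← h']
        rw [hSsplit]
      have hstab : (I.zip (S.drop 1)).map (segOf (ds ++ [x]))
          = (I.zip (S.drop 1)).map (segOf ds) := by
        refine map_seg_stable ds x _ ?_
        intro p hp2
        have := hlt _ (List.mem_of_mem_drop (List.of_mem_zip hp2).2); omega
      have hglue : segOf ds (sl, m) ++ String.ofList [x] = segOf (ds ++ [x]) (sl, m + 1) := by
        unfold segOf
        have h1 : (ds.drop sl).take (m - sl) = ds.drop sl := by
          apply List.take_of_length_le
          simp
          omega
        have h2 : ((ds ++ [x]).drop sl).take (m + 1 - sl) = ds.drop sl ++ [x] := by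
          rw [List.drop_append_of_le_length (by omega : sl ≤ ds.length)]
          apply List.take_of_length_le
          simp
          omega
        rw [h1, h2, String.ofList_append]
      rw [segsN, ← hSdef, hzip, hzip, List.map_append, List.map_append, hstab]
      rw [List.map_singleton, List.map_singleton]
      rw [List.dropLast_concat, getLast!_concat_str]
      rw [hglue]

theorem A_eq_segsN (cs : List Char) (marks : List Bool) :
    (PySem.List.enumerate cs 0).foldl (stepA marks) [] = segsN cs marks cs.length := by
  induction cs using List.reverseRecOn with
  | nil => simp [segsN, startsN]
  | append_singleton ds x ih =>
    rw [PySem.List.enumerate_append]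
    simp only [PySem.List.enumerate_cons, PySem.List.enumerate_nil, zero_add]
    rw [List.foldl_append, ih]
    simpa using step_segs ds x marks

-- ===== VERDICT (by name: the statement is the Claim_ definition above) =====
theorem split_marks_spec : Claim_equal_split_marks := by
  intro line marks _ _
  unfold Spec_split_marks split_marks
  rw [A_eq_segsN, B_eq_segsN]
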